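-- pv_equiv track=rewrite | github.com/Setland34/pyethereum | rlp.py | to_binary_array
-- ===== SOURCE A (Python) =====
-- def binary_length(n):
--     """
--     Calculate the binary length of a number.
--
--     Args:
--         n (int): The number to calculate the binary length for.
--
--     Returns:
--         int: The binary length of the number.
--     """
--     if n == 0:
--         return 0
--     else:
--         return 1 + binary_length(n // 256)
--
-- def to_binary_array(n, L=None):
--     """
--     Convert a number to a binary array.
--
--     Args:
--         n (int): The number to convert.
--         L (int, optional): The length of the binary array. Defaults to None.
--
--     Returns:
--         list: The binary array representation of the number.
--     """
--     if L is None: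
--         L = binary_length(n)
--     if n == 0:
--         return []
--     else:
--         x = to_binary_array(n // 256)
--         x.append(n % 256)
--         return x
-- ===== SOURCE B (Python) =====
-- def to_binary_array(n, L=None):
--     # L is accepted for signature compatibility but (like in A) never affects the result.
--     out = []
--     while n:
--         out.append(n % 256)
--         n //= 256
--     out.reverse()
--     return out
-- ===== Notes on version B (the rewrite author's own statement) =====
-- stated objective: simpler
-- what changed: Replaces A's two mutually-driving recursions (to_binary_array calling itself plus the recomputed binary_length at every level) with one flat while-loop collecting bytes least-significant-first and a final reverse.
import Mathlib
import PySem

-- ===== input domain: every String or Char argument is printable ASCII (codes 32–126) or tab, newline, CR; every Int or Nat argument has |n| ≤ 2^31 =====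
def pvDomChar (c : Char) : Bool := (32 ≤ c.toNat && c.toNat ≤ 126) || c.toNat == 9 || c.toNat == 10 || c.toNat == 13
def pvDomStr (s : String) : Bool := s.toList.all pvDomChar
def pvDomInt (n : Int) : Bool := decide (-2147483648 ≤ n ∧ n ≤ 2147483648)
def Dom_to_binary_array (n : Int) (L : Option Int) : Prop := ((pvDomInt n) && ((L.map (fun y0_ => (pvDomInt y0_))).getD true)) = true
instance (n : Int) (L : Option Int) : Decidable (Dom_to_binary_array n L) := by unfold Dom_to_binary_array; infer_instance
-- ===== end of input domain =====

-- B replaces A's pair of recursions (to_binary_array on itself plus binary_length recomputed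
-- at every level) with one flat loop collecting bytes least-significant-first, then a reverse.

-- termination measure fact used by all recursions below
theorem pv_floordiv_toNat_lt (n : Int) (h : ¬ n ≤ 0) : (PySem.Int.floordiv n 256).toNat < n.toNat := by
  rw [PySem.Int.floordiv_eq_ediv_of_pos (by omega)]
  have h1 : 0 ≤ n / 256 := Int.ediv_nonneg (by omega) (by omega)
  have h2 : n / 256 < n := by omega
  omega

-- ===== PORT A =====
-- Python's binary_length diverges for n < 0; the 'n ≤ 0' guard only totalizes (outside Pre_).
def binary_length (n : Int) : Int :=
  if h : n ≤ 0 then 0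
  else 1 + binary_length (PySem.Int.floordiv n 256)
termination_by n.toNat
decreasing_by exact pv_floordiv_toNat_lt n h

-- the recursive call to_binary_array(n // 256) has L = None, so it recomputes binary_length
def toBinANone (n : Int) : List Int :=
  let _L := binary_length n
  if h : n ≤ 0 then []
  else toBinANone (PySem.Int.floordiv n 256) ++ [PySem.Int.mod n 256]
termination_by n.toNat
decreasing_by exact pv_floordiv_toNat_lt n h

def to_binary_array (n : Int) (L : Option Int) : List Int :=
  match L with
  | none => toBinANone n
  | some _L =>
      if n ≤ 0 then []
      else toBinANone (PySem.Int.floordiv n 256) ++ [PySem.Int.mod n 256]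

-- ===== PORT B =====
-- while n: out.append(n % 256); n //= 256
def altLoop (n : Int) (out : List Int) : List Int :=
  if h : n ≤ 0 then out
  else altLoop (PySem.Int.floordiv n 256) (out ++ [PySem.Int.mod n 256])
termination_by n.toNat
decreasing_by exact pv_floordiv_toNat_lt n h

def to_binary_array_alt (n : Int) (_L : Option Int) : List Int :=
  (altLoop n []).reverse

-- ===== PRECONDITION & SPEC =====
-- Pre_ excludes n < 0, where Python A raises RecursionError (binary_length never reaches 0).
def Pre_to_binary_array (n : Int) (_L : Option Int) : Prop := 0 ≤ n
instance (n : Int) (L : Option Int) : Decidable (Pre_to_binary_array n L) := by unfold Pre_to_binary_array; infer_instance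

def pvWitness_to_binary_array : Int × Option Int := (70000, some 5)

def Spec_to_binary_array (n : Int) (L : Option Int) (out : List Int) : Prop := out = to_binary_array_alt n L
instance (n : Int) (L : Option Int) (out : List Int) : Decidable (Spec_to_binary_array n L out) := by unfold Spec_to_binary_array; infer_instance

-- ===== CLAIM (what is proved, stated in full; the proofs are below) =====
def Claim_equal_to_binary_array : Prop := ∀ (n : Int) (L : Option Int), Dom_to_binary_array n L → Pre_to_binary_array n L → Spec_to_binary_array n L (to_binary_array n L)

-- ===== LEMMAS AND PROOFS =====
theorem altLoop_reverse (k : Nat) (n : Int) (hn : n.toNat ≤ k) (out : List Int) :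
    (altLoop n out).reverse = toBinANone n ++ out.reverse := by
  induction k generalizing n out with
  | zero =>
      rw [altLoop, toBinANone]
      have h : n ≤ 0 := by omega
      simp [h]
  | succ k ih =>
      rw [altLoop, toBinANone]
      by_cases h : n ≤ 0
      · simp [h]
      · simp only [h, dif_neg, not_false_iff]
        rw [ih _ (by have := pv_floordiv_toNat_lt n h; omega)]
        simp

theorem to_binary_array_eq_toBinANone (n : Int) (L : Option Int) :
    to_binary_array n L = toBinANone n := by
  match L with
  | none => rfl
  | some l =>
      conv_rhs => rw [toBinANone]
      simp only [to_binary_array]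
      by_cases h : n ≤ 0 <;> simp [h]

-- ===== VERDICT (by name: the statement is the Claim_ definition above) =====
theorem to_binary_array_spec : Claim_equal_to_binary_array := by
  intro n L _ _
  unfold Spec_to_binary_array to_binary_array_alt
  rw [altLoop_reverse n.toNat n le_rfl, to_binary_array_eq_toBinANone]
  simp
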